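-- pv_equiv track=rewrite | github.com/hurxxxx/kure-embed-api | tests/test_gpu_performance.py | generate_synthetic_document
-- ===== SOURCE A (Python) =====
-- def generate_synthetic_document(target_chars: int = 32500) -> str:
--     """Generate synthetic Korean document for testing."""
--     base_sentences = [
--         "인공지능 기술이 빠르게 발전하고 있습니다.",
--         "기업의 디지털 전환이 가속화되고 있습니다.",
--         "클라우드 컴퓨팅이 비즈니스 혁신을 이끌고 있습니다.",
--         "데이터 분석을 통한 인사이트 도출이 중요합니다.",
--         "자동화 기술이 업무 효율성을 크게 향상시킵니다.",
--         "사이버 보안의 중요성이 날로 증가하고 있습니다.",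
--         "원격 근무 환경에서의 협업 도구가 필수가 되었습니다.",
--         "고객 경험 개선을 위한 개인화 서비스가 확산됩니다.",
--         "지속 가능한 경영이 기업의 핵심 과제입니다.",
--         "블록체인 기술이 다양한 산업에 적용되고 있습니다."
--     ]
--
--     document = ""
--     sentence_idx = 0
--
--     while len(document) < target_chars:
--         sentence = base_sentences[sentence_idx % len(base_sentences)]
--         document += f"{sentence} "
--         sentence_idx += 1
--
--     return document[:target_chars]
-- ===== SOURCE B (Python) =====
-- def generate_synthetic_document(target_chars: int = 32500) -> str:
--     """Generate synthetic Korean document for testing."""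
--     base_sentences = [
--         "인공지능 기술이 빠르게 발전하고 있습니다.",
--         "기업의 디지털 전환이 가속화되고 있습니다.",
--         "클라우드 컴퓨팅이 비즈니스 혁신을 이끌고 있습니다.",
--         "데이터 분석을 통한 인사이트 도출이 중요합니다.",
--         "자동화 기술이 업무 효율성을 크게 향상시킵니다.",
--         "사이버 보안의 중요성이 날로 증가하고 있습니다.",
--         "원격 근무 환경에서의 협업 도구가 필수가 되었습니다.",
--         "고객 경험 개선을 위한 개인화 서비스가 확산됩니다.",
--         "지속 가능한 경영이 기업의 핵심 과제입니다.",
--         "블록체인 기술이 다양한 산업에 적용되고 있습니다."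
--     ]
--     period = "".join(f"{s} " for s in base_sentences)
--     repeats = target_chars // len(period) + 1
--     return (period * repeats)[:target_chars]
-- ===== Notes on version B (the rewrite author's own statement) =====
-- stated objective: faster
-- what changed: Replaces A's cyclic while-loop that appends one sentence at a time until the target length is reached by a closed form: precompute the joined period string once, take one more than the floor quotient of target_chars by the period length as the repeat count, and return the sliced string multiplication (period * repeats)[:target_chars].
import Mathlib
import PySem

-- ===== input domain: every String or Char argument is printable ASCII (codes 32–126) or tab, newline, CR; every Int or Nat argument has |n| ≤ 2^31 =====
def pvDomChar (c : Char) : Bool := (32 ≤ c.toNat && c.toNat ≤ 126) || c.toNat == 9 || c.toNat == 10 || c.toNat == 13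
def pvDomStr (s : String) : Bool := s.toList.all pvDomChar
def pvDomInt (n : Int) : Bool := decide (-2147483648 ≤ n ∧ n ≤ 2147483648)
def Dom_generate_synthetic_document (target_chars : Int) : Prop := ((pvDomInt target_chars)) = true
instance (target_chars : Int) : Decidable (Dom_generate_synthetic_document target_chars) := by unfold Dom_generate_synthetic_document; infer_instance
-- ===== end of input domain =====

-- B replaces A's sentence-by-sentence while-loop accumulation by a closed-form repetition count and one slice (objective: simpler).

-- ===== PORT A =====
-- the fixed sentence list, as lists of chars
def pvSentences : List (List Char) :=
  [ "인공지능 기술이 빠르게 발전하고 있습니다.".toList,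
    "기업의 디지털 전환이 가속화되고 있습니다.".toList,
    "클라우드 컴퓨팅이 비즈니스 혁신을 이끌고 있습니다.".toList,
    "데이터 분석을 통한 인사이트 도출이 중요합니다.".toList,
    "자동화 기술이 업무 효율성을 크게 향상시킵니다.".toList,
    "사이버 보안의 중요성이 날로 증가하고 있습니다.".toList,
    "원격 근무 환경에서의 협업 도구가 필수가 되었습니다.".toList,
    "고객 경험 개선을 위한 개인화 서비스가 확산됩니다.".toList,
    "지속 가능한 경영이 기업의 핵심 과제입니다.".toList,
    "블록체인 기술이 다양한 산업에 적용되고 있습니다.".toList ]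

-- A's while loop: document += f"{sentence} ", sentence_idx += 1, until len(document) >= target
-- (sentence_idx is a nonnegative Python int, ported as Nat; idx % len(base_sentences) is always in range)
def pvLoopA (target : Int) (doc : List Char) (idx : Nat) : List Char :=
  if (doc.length : Int) < target then
    pvLoopA target (doc ++ (pvSentences.getD (idx % pvSentences.length) [] ++ [' '])) (idx + 1)
  else doc
termination_by (target - doc.length).toNat
decreasing_by simp [List.length_append]; omega

def generate_synthetic_document (target_chars : Int) : String :=
  String.ofList (PySem.List.slice (pvLoopA target_chars [] 0) none (some target_chars))

-- ===== PORT B =====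
-- period = "".join(f"{s} " for s in base_sentences)
def pvPeriod : List Char := (pvSentences.map (fun s => s ++ [' '])).flatten

-- repeats = target_chars // len(period) + 1; return (period * repeats)[:target_chars]
def generate_synthetic_document_alt (target_chars : Int) : String :=
  let repeats : Int := PySem.Int.floordiv target_chars (pvPeriod.length : Int) + 1
  String.ofList (PySem.List.slice ((List.replicate repeats.toNat pvPeriod).flatten) none (some target_chars))

-- ===== PRECONDITION & SPEC =====
def Spec_generate_synthetic_document (target_chars : Int) (out : String) : Prop := out = generate_synthetic_document_alt target_chars
instance (target_chars : Int) (out : String) : Decidable (Spec_generate_synthetic_document target_chars out) := by unfold Spec_generate_synthetic_document; infer_instance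

-- ===== CLAIM (what is proved, stated in full; the proofs are below) =====
def Claim_equal_generate_synthetic_document : Prop := ∀ (target_chars : Int), Dom_generate_synthetic_document target_chars → Spec_generate_synthetic_document target_chars (generate_synthetic_document target_chars)

-- ===== LEMMAS AND PROOFS =====

-- the document after i loop iterations: sentences 0..i-1 taken cyclically, each followed by a space
def pvCyc (i : Nat) : List Char :=
  ((List.range i).map (fun j => pvSentences.getD (j % pvSentences.length) [] ++ [' '])).flatten

-- the period repeated m times
def pvRep (m : Nat) : List Char := (List.replicate m pvPeriod).flatten

lemma pvCyc_succ (i : Nat) :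
    pvCyc (i + 1) = pvCyc i ++ (pvSentences.getD (i % pvSentences.length) [] ++ [' ']) := by
  simp [pvCyc, List.range_succ]

lemma pvCyc_len_succ (i : Nat) : (pvCyc i).length < (pvCyc (i + 1)).length := by
  rw [pvCyc_succ]; simp

lemma pvLoopA_spec (n : Nat) : ∀ (t : Int) (k : Nat),
    (t - ((pvCyc k).length : Int)).toNat ≤ n →
    ∃ m, pvLoopA t (pvCyc k) k = pvCyc m ∧ t ≤ ((pvCyc m).length : Int) := by
  induction n with
  | zero =>
    intro t k h
    rw [pvLoopA]
    rw [if_neg (by omega)]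
    exact ⟨k, rfl, by omega⟩
  | succ n ih =>
    intro t k h
    rw [pvLoopA]
    by_cases ht : ((pvCyc k).length : Int) < t
    · rw [if_pos ht, ← pvCyc_succ]
      exact ih t (k + 1) (by have := pvCyc_len_succ k; omega)
    · rw [if_neg ht]
      exact ⟨k, rfl, by omega⟩

-- pvCyc is monotone as a prefix chain
lemma pvCyc_prefix (a b : Nat) (hab : a ≤ b) : pvCyc a <+: pvCyc b := by
  induction b with
  | zero => simp_all
  | succ b ih =>
    rcases Nat.lt_or_ge a (b + 1) with h | h
    · exact (ih (by omega)).trans ⟨_, (pvCyc_succ b).symm⟩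
    · have : a = b + 1 := by omega
      subst this; exact List.prefix_refl _

set_option maxRecDepth 20000 in
lemma pvCyc_ten : pvCyc 10 = pvPeriod := by decide

set_option maxRecDepth 20000 in
lemma pvPeriod_len : (pvPeriod.length : Int) = 270 := by decide

lemma pvCyc_ten_mul (m : Nat) : pvCyc (10 * m) = pvRep m := by
  induction m with
  | zero => simp [pvCyc, pvRep]
  | succ m ih =>
    have h10 : 10 * (m + 1) = 10 * m + 10 := by ring
    rw [h10]
    have hsplit : pvCyc (10 * m + 10) = pvCyc (10 * m) ++ pvCyc 10 := by
      unfold pvCyc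
      rw [List.range_add, List.map_append, List.flatten_append]
      congr 1
      congr 1
      rw [List.map_map]
      apply List.map_congr_left
      intro j hj
      have hj10 : j < 10 := List.mem_range.mp hj
      simp only [Function.comp_apply]
      have hlen : pvSentences.length = 10 := rfl
      have : (10 * m + j) % pvSentences.length = j % pvSentences.length := by
        rw [hlen]; omega
      rw [this]
    rw [hsplit, ih, pvCyc_ten]
    simp [pvRep, List.replicate_succ']
lemma pvRep_prefix (a b : Nat) (hab : a ≤ b) : pvRep a <+: pvRep b := by
  refine ⟨pvRep (b - a), ?_⟩
  unfold pvRep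
  rw [← List.flatten_append, List.replicate_append_replicate,
    show a + (b - a) = b from by omega]

lemma take_of_prefix {α : Type} (l L : List α) (t : Nat) (h : l <+: L) (ht : t ≤ l.length) :
    l.take t = L.take t := by
  obtain ⟨tail, rfl⟩ := h
  rw [List.take_append_of_le_length ht]

lemma pvRep_length (m : Nat) : ((pvRep m).length : Int) = m * 270 := by
  unfold pvRep
  rw [List.length_flatten, List.map_replicate, List.sum_replicate, smul_eq_mul]
  have h : (pvPeriod.length : Int) = 270 := pvPeriod_len
  push_cast
  rw [h]

-- ===== VERDICT (by name: the statement is the Claim_ definition above) =====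
theorem generate_synthetic_document_spec : Claim_equal_generate_synthetic_document := by
  unfold Claim_equal_generate_synthetic_document
  intro t _
  unfold Spec_generate_synthetic_document
  simp only [generate_synthetic_document, generate_synthetic_document_alt]
  have hL : (pvPeriod.length : Int) = 270 := pvPeriod_len
  rw [hL]
  by_cases ht0 : 0 ≤ t
  · -- target ≥ 0: both sides are take t of a common repetition of the period
    have hcyc0 : pvCyc 0 = ([] : List Char) := by simp [pvCyc]
    obtain ⟨m, hm, hmlen⟩ := pvLoopA_spec t.toNat t 0 (by rw [hcyc0]; simp)
    rw [hcyc0] at hm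
    rw [hm]
    set r : Int := PySem.Int.floordiv t 270 + 1 with hr
    have hlt : t < (PySem.Int.floordiv t 270 + 1) * 270 :=
      (PySem.Int.floordiv_lt_iff_lt_mul (by omega)).mp (by omega)
    have hfd0 : 0 ≤ PySem.Int.floordiv t 270 :=
      (PySem.Int.le_floordiv_iff_mul_le (by omega)).mpr (by omega)
    have hrtn : (r.toNat : Int) = r := Int.toNat_of_nonneg (by omega)
    have hrep_len : t ≤ ((pvRep r.toNat).length : Int) := by
      rw [pvRep_length, hrtn]; omega
    rw [PySem.List.slice_to _ ht0, PySem.List.slice_to _ ht0]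
    show String.ofList ((pvCyc m).take t.toNat) = String.ofList ((pvRep r.toNat).take t.toNat)
    congr 1
    have h1 : pvCyc m <+: pvRep (m + r.toNat) := by
      refine (pvCyc_prefix m (10 * (m + r.toNat)) (by omega)).trans ?_
      rw [pvCyc_ten_mul]
    have h2 : pvRep r.toNat <+: pvRep (m + r.toNat) := pvRep_prefix _ _ (by omega)
    rw [take_of_prefix _ _ _ h1 (by omega),
      take_of_prefix _ _ _ h2 (by have := pvRep_length (m + r.toNat); omega)]
  · -- negative target: A's loop never runs and B repeats the period zero times; both are ""
    have hA : pvLoopA t [] 0 = [] := by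
      rw [pvLoopA, if_neg (by simp; omega)]
    have hfdneg : PySem.Int.floordiv t 270 < 0 :=
      (PySem.Int.floordiv_lt_iff_lt_mul (q := 0) (by omega)).mpr (by omega)
    have hr0 : (PySem.Int.floordiv t 270 + 1).toNat = 0 := by omega
    rw [hA, hr0]
    simp [PySem.List.slice]
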